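-- pv_equiv track=rewrite | github.com/Vergil0327/leetcode-history | Binary Search/3605. Minimum Stability Factor of Array/solution.py | count
-- ===== SOURCE A (Python) =====
-- from typing import List
--
-- from math import gcd, log2
--
-- def query_gcd(st, l, r):  # [l, r)
--     length = r - l
--     k = int(log2(length))
--     return gcd(st[l][k], st[r - (1 << k)][k])
--
-- def count(nums: List[int], length: int, table: List[List[int]]) -> int:
--     n = len(nums)
--
--     cnt = 0
--     l = 0
--     while l + length - 1 < n:
--         g = query_gcd(table, l, l+length)
--
--         if g > 1:
--             cnt += 1
--             l += length
--         else:
--             l += 1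
--     return cnt
-- ===== SOURCE B (Python) =====
-- from math import gcd
--
-- def count(nums, length, table):
--     n = len(nums)
--     m = n - length + 1  # number of valid window starts
--     if m <= 0:
--         return 0
--     k = length.bit_length() - 1
--     # dp[l] = number of windows the greedy scan collects when started at position l
--     dp = [0] * (n + 1)
--     for l in range(m - 1, -1, -1):
--         g = gcd(table[l][k], table[l + length - (1 << k)][k])
--         dp[l] = dp[l + length] + 1 if g > 1 else dp[l + 1]
--     return dp[0]
-- ===== Notes on version B (the rewrite author's own statement) =====
-- stated objective: alternative
-- what changed: B replaces A's forward greedy while-loop (with a per-query helper using float log2) by a right-to-left dynamic program: k is computed once by integer bit_length, and dp[l] = answer of the scan started at l is filled back-to-front by the recurrence dp[l] = dp[l+length]+1 if the window gcd from the table exceeds 1 else dp[l+1]; the result is dp[0], with no while-loop, counter or greedy pointer.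
-- outside the precondition, e.g. on count([2, 2, 3], 2, [[0, 4], [9]]): A returns 1, B raises IndexError; on count([2, 2, 3], 2, [[0, 4]]): A returns 1, B raises IndexError
import Mathlib
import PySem

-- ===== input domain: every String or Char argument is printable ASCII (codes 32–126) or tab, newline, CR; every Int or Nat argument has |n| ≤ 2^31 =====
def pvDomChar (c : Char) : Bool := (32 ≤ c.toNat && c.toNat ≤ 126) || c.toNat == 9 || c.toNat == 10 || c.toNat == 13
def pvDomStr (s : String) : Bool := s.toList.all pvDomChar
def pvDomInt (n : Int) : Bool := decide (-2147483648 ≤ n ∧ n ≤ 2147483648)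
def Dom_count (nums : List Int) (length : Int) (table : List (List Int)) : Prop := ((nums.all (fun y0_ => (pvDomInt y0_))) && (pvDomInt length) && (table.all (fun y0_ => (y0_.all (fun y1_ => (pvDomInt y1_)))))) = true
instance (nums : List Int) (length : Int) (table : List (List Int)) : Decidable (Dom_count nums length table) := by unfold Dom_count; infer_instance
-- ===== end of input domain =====

-- B replaces A's forward greedy while-loop by a right-to-left dynamic program over all window
-- starts (dp[l] = answer of the scan started at l), reading the same sparse-table entries;
-- alternative decomposition, same result.

-- ===== PORT A =====
-- query_gcd(st, l, r): int(log2(length)) equals Nat.log2 length.toNat for 1 ≤ length ≤ 2^31 (Dom);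
-- st[l][k] indexing: IndexError is excluded by Pre_count, the port defaults to 0 there.
def pvQueryGcd (st : List (List Int)) (l r : Int) : Int :=
  let len := r - l
  let k := Nat.log2 len.toNat
  let a := ((PySem.List.pyGet? st l).bind (fun row => PySem.List.pyGet? row ((k : Nat) : Int))).getD 0
  let b := ((PySem.List.pyGet? st (r - ((2 : Int) ^ k))).bind (fun row => PySem.List.pyGet? row ((k : Nat) : Int))).getD 0
  (Int.gcd a b : Int)

-- the while loop of A; fuel = len(nums)+1 bounds its iterations on every input in Pre_count
def pvCountLoopA (nums : List Int) (length : Int) (table : List (List Int)) : Nat → Int → Int → Int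
  | 0, cnt, _ => cnt
  | fuel+1, cnt, l =>
    if l + length - 1 < (nums.length : Int) then
      let g := pvQueryGcd table l (l + length)
      if g > 1 then pvCountLoopA nums length table fuel (cnt + 1) (l + length)
      else pvCountLoopA nums length table fuel cnt (l + 1)
    else cnt

def count (nums : List Int) (length : Int) (table : List (List Int)) : Int :=
  pvCountLoopA nums length table (nums.length + 1) 0 0

-- ===== PORT B =====
-- g = gcd(table[l][k], table[l + length - (1 << k)][k]); IndexError excluded by Pre_count, default 0
def pvG (table : List (List Int)) (k : Nat) (length l : Int) : Int :=
  (Int.gcd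
    (((PySem.List.pyGet? table l).bind (fun row => PySem.List.pyGet? row ((k : Nat) : Int))).getD 0)
    (((PySem.List.pyGet? table (l + length - (2 : Int) ^ k)).bind (fun row => PySem.List.pyGet? row ((k : Nat) : Int))).getD 0) : Nat)

-- one iteration of B's dp loop: dp[l] = dp[l+length] + 1 if g > 1 else dp[l+1]
-- (the assignment dp[l] = v is ported as List.set l.toNat v; exact since 0 ≤ l < len(dp) for every l the loop visits)
def pvStepB (table : List (List Int)) (k : Nat) (length : Int) (dp : List Int) (l : Int) : List Int :=
  dp.set l.toNat
    (if pvG table k length l > 1 then (PySem.List.pyGet? dp (l + length)).getD 0 + 1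
     else (PySem.List.pyGet? dp (l + 1)).getD 0)

-- Python B's locals m = n - length + 1 and k = length.bit_length() - 1 are inlined
-- (length.bit_length() - 1 = Nat.log2 length.toNat for the length ≥ 1 inputs reaching the else branch in Pre_count);
-- the for-loop over range(m-1, -1, -1) is the foldl of pvStepB over pyRange (m-1) (-1) (-1); dp[0] read via pyGet?.
def count_alt (nums : List Int) (length : Int) (table : List (List Int)) : Int :=
  if (nums.length : Int) - length + 1 ≤ 0 then 0
  else
    (PySem.List.pyGet?
      ((PySem.List.pyRange ((nums.length : Int) - length + 1 - 1) (-1) (-1)).foldl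
        (pvStepB table (Nat.log2 length.toNat) length)
        (List.replicate (nums.length + 1) 0)) 0).getD 0

-- ===== PRECONDITION & SPEC =====
-- Pre_count excludes (a) length ≤ 0, where A raises a math domain error in log2, and
-- (b) 1 ≤ length ≤ len(nums) with a `table` lacking the gcd-sparse-table SHAPE (an entry [i][k],
-- k = ⌊log2 length⌋, for every i ≤ n − 2^k): A reads entries only at greedily reached window
-- starts and can still return on such shape-deficient tables, where B's dp loop raises IndexError.
def Pre_count (nums : List Int) (length : Int) (table : List (List Int)) : Prop :=
  ((nums.length : Int) < length) ∨
  (1 ≤ length ∧ length ≤ (nums.length : Int) ∧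
    (nums.length + 1 - 2 ^ Nat.log2 length.toNat ≤ table.length ∧
     ∀ row ∈ table.take (nums.length + 1 - 2 ^ Nat.log2 length.toNat),
       Nat.log2 length.toNat < row.length))

instance (nums : List Int) (length : Int) (table : List (List Int)) : Decidable (Pre_count nums length table) := by unfold Pre_count; infer_instance

def pvWitness_count : List Int × Int × List (List Int) := ([2, 4, 3], 2, [[2, 2], [4, 1], [3]])

def Spec_count (nums : List Int) (length : Int) (table : List (List Int)) (out : Int) : Prop := out = count_alt nums length table
instance (nums : List Int) (length : Int) (table : List (List Int)) (out : Int) : Decidable (Spec_count nums length table out) := by unfold Spec_count; infer_instance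

-- ===== CLAIM (what is proved, stated in full; the proofs are below) =====
def Claim_equal_count : Prop := ∀ (nums : List Int) (length : Int) (table : List (List Int)), Dom_count nums length table → Pre_count nums length table → Spec_count nums length table (count nums length table)

-- ===== LEMMAS AND PROOFS =====

-- B's dp loop over positions t-1, t-2, …, 0
def pvFold (table : List (List Int)) (k : Nat) (length : Int) (t : Nat) (dp : List Int) : List Int :=
  (PySem.List.pyRange ((t : Int) - 1) (-1) (-1)).foldl (pvStepB table k length) dp

theorem pvFold_zero (table : List (List Int)) (k : Nat) (length : Int) (dp : List Int) :
    pvFold table k length 0 dp = dp := by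
  unfold pvFold
  rw [PySem.List.pyRange_neg_one_eq_nil (by norm_num)]
  rfl

theorem pvFold_succ (table : List (List Int)) (k : Nat) (length : Int) (t : Nat) (dp : List Int) :
    pvFold table k length (t + 1) dp = pvFold table k length t (pvStepB table k length dp (t : Int)) := by
  unfold pvFold
  simp only [Nat.cast_add, Nat.cast_one, add_sub_cancel_right]
  rw [PySem.List.pyRange_neg_one_cons (by omega : (-1 : Int) < (t : Int))]
  rfl

-- entries at index ≥ t are untouched by the loop over t-1 … 0
theorem pvFold_pres (table : List (List Int)) (k : Nat) (length : Int) :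
    ∀ (t : Nat) (dp : List Int) (j : Nat), t ≤ j → (pvFold table k length t dp)[j]? = dp[j]? := by
  intro t
  induction t with
  | zero => intro dp j _; rw [pvFold_zero]
  | succ t ih =>
    intro dp j hj
    rw [pvFold_succ, ih _ _ (by omega)]
    unfold pvStepB
    rw [List.getElem?_set_ne (by omega : ((t : Int)).toNat ≠ j)]

-- every entry below t satisfies the dp recurrence in the FINAL list
theorem pvFold_rec (table : List (List Int)) (k : Nat) (length : Int) (h1 : 1 ≤ length) :
    ∀ (t : Nat) (dp : List Int) (N : Nat), dp.length = N → t + length.toNat ≤ N →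
      ∀ j : Nat, j < t →
        (pvFold table k length t dp)[j]? = some
          (if pvG table k length (j : Int) > 1 then
            (PySem.List.pyGet? (pvFold table k length t dp) ((j : Int) + length)).getD 0 + 1
           else (PySem.List.pyGet? (pvFold table k length t dp) ((j : Int) + 1)).getD 0) := by
  intro t
  induction t with
  | zero => intro dp N _ _ j hj; omega
  | succ t ih =>
    intro dp N hlen hts j hj
    have hdp1 : (pvStepB table k length dp (t : Int)).length = N := by simp [pvStepB, hlen]
    rw [pvFold_succ]
    by_cases hjt : j < t
    · exact ih _ N hdp1 (by omega) j hjt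
    · have hjt' : j = t := by omega
      subst hjt'
      -- the entry written at index j; its reads from dp coincide with reads from the final list,
      -- because indices > j are never written afterwards
      have hread : ∀ i : Nat, j + 1 ≤ i →
          (pvFold table k length j (pvStepB table k length dp (j : Int)))[i]? = dp[i]? := by
        intro i hi
        rw [pvFold_pres _ _ _ _ _ _ (by omega)]
        unfold pvStepB
        rw [List.getElem?_set_ne (by omega : ((j : Int)).toNat ≠ i)]
      have e1 : PySem.List.pyGet? (pvFold table k length j (pvStepB table k length dp (j : Int))) ((j : Int) + length)
          = PySem.List.pyGet? dp ((j : Int) + length) := by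
        rw [PySem.List.pyGet?_of_nonneg _ (by omega : (0 : Int) ≤ (j : Int) + length),
            PySem.List.pyGet?_of_nonneg _ (by omega : (0 : Int) ≤ (j : Int) + length),
            hread _ (by omega)]
      have e2 : PySem.List.pyGet? (pvFold table k length j (pvStepB table k length dp (j : Int))) ((j : Int) + 1)
          = PySem.List.pyGet? dp ((j : Int) + 1) := by
        rw [PySem.List.pyGet?_of_nonneg _ (by omega : (0 : Int) ≤ (j : Int) + 1),
            PySem.List.pyGet?_of_nonneg _ (by omega : (0 : Int) ≤ (j : Int) + 1),
            hread _ (by omega)]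
      rw [pvFold_pres _ _ _ _ _ _ (le_refl j), e1, e2]
      unfold pvStepB
      rw [Int.toNat_natCast, List.getElem?_set_self (by omega : j < dp.length)]

-- A's lazy greedy loop computes cnt + dp'[l] for any list dp' satisfying the dp recurrence
theorem pv_loopA_eq (nums : List Int) (length : Int) (table : List (List Int))
    (h1 : 1 ≤ length) (h2 : length ≤ (nums.length : Int)) (dp' : List Int)
    (hrec : ∀ j : Nat, (j : Int) < (nums.length : Int) - length + 1 →
      dp'[j]? = some
        (if pvG table (Nat.log2 length.toNat) length (j : Int) > 1 then
          (PySem.List.pyGet? dp' ((j : Int) + length)).getD 0 + 1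
         else (PySem.List.pyGet? dp' ((j : Int) + 1)).getD 0))
    (hzero : ∀ j : Nat, (nums.length : Int) - length + 1 ≤ (j : Int) → j ≤ nums.length →
      dp'[j]? = some 0) :
    ∀ (fuel : Nat) (cnt l : Int), 0 ≤ l → l ≤ (nums.length : Int) →
      (nums.length : Int) - length + 1 ≤ l + fuel →
      pvCountLoopA nums length table fuel cnt l = cnt + (PySem.List.pyGet? dp' l).getD 0 := by
  intro fuel
  induction fuel with
  | zero =>
    intro cnt l h0 hn hm
    have h : (PySem.List.pyGet? dp' l).getD 0 = 0 := by
      rw [PySem.List.pyGet?_of_nonneg _ h0, hzero l.toNat (by omega) (by omega)]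
      rfl
    simp [pvCountLoopA, h]
  | succ fuel ih =>
    intro cnt l h0 hn hm
    simp only [pvCountLoopA]
    by_cases hg : l + length - 1 < (nums.length : Int)
    · rw [if_pos hg]
      have hq : pvQueryGcd table l (l + length) = pvG table (Nat.log2 length.toNat) length l := by
        unfold pvQueryGcd pvG
        rw [add_sub_cancel_left]
      have hdl : (PySem.List.pyGet? dp' l).getD 0 =
          (if pvG table (Nat.log2 length.toNat) length l > 1 then
            (PySem.List.pyGet? dp' (l + length)).getD 0 + 1
           else (PySem.List.pyGet? dp' (l + 1)).getD 0) := by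
        rw [PySem.List.pyGet?_of_nonneg _ h0,
            hrec l.toNat (by omega), Option.getD_some,
            show ((l.toNat : Nat) : Int) = l from by omega]
      rw [hq]
      by_cases hgt : pvG table (Nat.log2 length.toNat) length l > 1
      · rw [if_pos hgt]
        rw [ih (cnt + 1) (l + length) (by omega) (by omega) (by omega), hdl, if_pos hgt]
        ring
      · rw [if_neg hgt]
        rw [ih cnt (l + 1) (by omega) (by omega) (by omega), hdl, if_neg hgt]
    · rw [if_neg hg]
      have h : (PySem.List.pyGet? dp' l).getD 0 = 0 := by
        rw [PySem.List.pyGet?_of_nonneg _ h0, hzero l.toNat (by omega) (by omega)]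
        rfl
      rw [h, add_zero]

-- ===== VERDICT (by name: the statement is the Claim_ definition above) =====
theorem count_spec : Claim_equal_count := by
  intro nums length table _ hpre
  unfold Spec_count count count_alt
  rcases hpre with h | ⟨h1, h2, _⟩
  · rw [if_pos (by omega : (nums.length : Int) - length + 1 ≤ 0)]
    have hg : ¬ ((0 : Int) + length - 1 < (nums.length : Int)) := by omega
    simp only [pvCountLoopA, if_neg hg]
  · rw [if_neg (by omega : ¬ (nums.length : Int) - length + 1 ≤ 0)]
    set K : Nat := Nat.log2 length.toNat with hK
    set T : Nat := ((nums.length : Int) - length + 1).toNat with hT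
    have hmt : ((T : Nat) : Int) = (nums.length : Int) - length + 1 := by omega
    rw [← hmt]
    have hrec' : ∀ j : Nat, (j : Int) < (nums.length : Int) - length + 1 →
        (pvFold table K length T (List.replicate (nums.length + 1) 0))[j]? = some
          (if pvG table K length (j : Int) > 1 then
            (PySem.List.pyGet? (pvFold table K length T (List.replicate (nums.length + 1) 0)) ((j : Int) + length)).getD 0 + 1
           else (PySem.List.pyGet? (pvFold table K length T (List.replicate (nums.length + 1) 0)) ((j : Int) + 1)).getD 0) := by
      intro j hj
      exact pvFold_rec table K length h1 T (List.replicate (nums.length + 1) 0) (nums.length + 1)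
        (by simp) (by omega) j (by omega)
    have hzero' : ∀ j : Nat, (nums.length : Int) - length + 1 ≤ (j : Int) → j ≤ nums.length →
        (pvFold table K length T (List.replicate (nums.length + 1) 0))[j]? = some 0 := by
      intro j hj1 hj2
      rw [pvFold_pres _ _ _ _ _ _ (by omega : T ≤ j), List.getElem?_replicate, if_pos (by omega)]
    rw [pv_loopA_eq nums length table h1 h2
        (pvFold table K length T (List.replicate (nums.length + 1) 0)) hrec' hzero'
        (nums.length + 1) 0 0 (le_refl 0) (by omega) (by omega), zero_add]
    rfl
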